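-- pv_equiv track=rewrite | github.com/lllDavid/Python | generator/usernames.py | insert_separators_in_word
-- ===== SOURCE A (Python) =====
-- from itertools import product, permutations
--
-- def insert_separators_in_word(word, separators):
--     if len(word) == 1:
--         return [word]
--     slots = len(word) - 1
--     sep_choices = list(product(separators, repeat=slots))
--     results = []
--     for seps in sep_choices:
--         pieces = []
--         for i in range(len(word)):
--             pieces.append(word[i])
--             if i < slots:
--                 pieces.append(seps[i])
--         results.append(''.join(pieces))
--     return results
-- ===== SOURCE B (Python) =====
-- def insert_separators_in_word(word, separators):
--     results = [word[0]]
--     for ch in word[1:]: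
--         results = [r + sep + ch for r in results for sep in separators]
--     return results
-- ===== Notes on version B (the rewrite author's own statement) =====
-- stated objective: simpler
-- what changed: Instead of materialising the full itertools.product of separator tuples and then rebuilding each word piece by piece with index arithmetic, B grows the result list incrementally letter by letter, extending every partial word with each separator; Pre_ excludes the empty word, on which both A (ValueError from product(repeat=-1)) and B (IndexError from word[0]) raise.
import Mathlib
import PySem

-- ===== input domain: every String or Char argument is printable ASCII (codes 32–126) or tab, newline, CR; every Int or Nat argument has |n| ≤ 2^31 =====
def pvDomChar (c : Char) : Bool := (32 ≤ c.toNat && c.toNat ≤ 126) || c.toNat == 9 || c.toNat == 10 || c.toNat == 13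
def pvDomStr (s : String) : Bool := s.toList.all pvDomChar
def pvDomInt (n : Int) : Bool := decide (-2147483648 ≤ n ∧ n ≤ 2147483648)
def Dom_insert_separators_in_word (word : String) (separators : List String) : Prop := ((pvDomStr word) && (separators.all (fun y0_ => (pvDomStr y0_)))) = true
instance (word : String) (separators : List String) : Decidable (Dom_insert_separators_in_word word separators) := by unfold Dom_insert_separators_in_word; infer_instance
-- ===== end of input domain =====

-- B replaces A's itertools.product-then-rebuild enumeration by a simpler incremental
-- letter-by-letter extension of the partial results (objective: simpler, same cost).

-- ===== PORT A =====
-- itertools.product(separators, repeat=n): first coordinate varies slowest.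
def pvProdRep (separators : List String) : Nat → List (List String)
  | 0 => [[]]
  | n + 1 => separators.flatMap (fun s => (pvProdRep separators n).map (fun t => s :: t))

def insert_separators_in_word (word : String) (separators : List String) : List String :=
  if PySem.Str.len word == 1 then [word]
  else
    let slots := word.toList.length - 1
    let sep_choices := pvProdRep separators slots
    let results := sep_choices.map (fun seps =>
      -- for i in range(len(word)): pieces.append(word[i]); if i < slots: pieces.append(seps[i])
      -- both indexings are always in range, so the defaults of pyGet?/pyGetD are never read
      let pieces := (List.range word.toList.length).foldl
        (fun (acc : List String) (i : Nat) =>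
          let acc := acc ++ [((PySem.Str.pyGet? word (i : Int)).map Char.toString).getD ""]
          if i < slots then acc ++ [PySem.List.pyGetD seps (i : Int) ""] else acc)
        ([] : List String)
      PySem.Str.join "" pieces)
    results

-- ===== PORT B =====
def insert_separators_in_word_alt (word : String) (separators : List String) : List String :=
  match word.toList with
  | [] => []  -- unreachable under Pre_ (Python B raises IndexError on word[0] there)
  | c :: rest =>  -- results = [word[0]]; for ch in word[1:]: …
    rest.foldl
      (fun results ch =>
        results.flatMap (fun r => separators.map (fun sep => r ++ sep ++ ch.toString)))
      [c.toString]

-- ===== PRECONDITION & SPEC =====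
-- Pre_ excludes only the empty word, on which Python A raises ValueError
-- (product(..., repeat=-1)) and Python B raises IndexError (word[0]).
def Pre_insert_separators_in_word (word : String) (separators : List String) : Prop := word ≠ ""
instance (word : String) (separators : List String) : Decidable (Pre_insert_separators_in_word word separators) := by unfold Pre_insert_separators_in_word; infer_instance
def pvWitness_insert_separators_in_word : String × List String := ("ab", [",", "-"])

def Spec_insert_separators_in_word (word : String) (separators : List String) (out : List String) : Prop := out = insert_separators_in_word_alt word separators
instance (word : String) (separators : List String) (out : List String) : Decidable (Spec_insert_separators_in_word word separators out) := by unfold Spec_insert_separators_in_word; infer_instance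

-- ===== CLAIM (what is proved, stated in full; the proofs are below) =====
def Claim_equal_insert_separators_in_word : Prop := ∀ (word : String) (separators : List String), Dom_insert_separators_in_word word separators → Pre_insert_separators_in_word word separators → Spec_insert_separators_in_word word separators (insert_separators_in_word word separators)

-- ===== LEMMAS AND PROOFS =====

-- canonical depth-first enumeration both ports reduce to
def pvCanon (seps : List String) (acc : String) : List Char → List String
  | [] => [acc]
  | c :: cs => seps.flatMap (fun s => pvCanon seps (acc ++ s ++ c.toString) cs)

-- fill the gaps of `cs` with the tuple `ss` after prefix `acc` (A's per-tuple string)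
def pvFill (acc : String) : List Char → List String → String
  | [], _ => acc
  | _ :: _, [] => acc
  | c :: cs, s :: ss => pvFill (acc ++ s ++ c.toString) cs ss

-- the pieces list A's inner loop builds, as an interleaving (last char carries no sep)
def pvInter : List Char → List String → List String
  | [], _ => []
  | [c], _ => [c.toString]
  | c :: _ :: _, [] => [c.toString]
  | c :: c' :: cs, s :: ss => c.toString :: s :: pvInter (c' :: cs) ss

-- same interleaving without the leading char: sep first, then char, …
def pvSC : List Char → List String → List String
  | [], _ => []
  | _ :: _, [] => []
  | c :: cs, s :: ss => s :: c.toString :: pvSC cs ss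

lemma pv_join_nil : PySem.Str.join "" [] = "" := by decide

lemma pv_join_cons (x : String) (l : List String) :
    PySem.Str.join "" (x :: l) = x ++ PySem.Str.join "" l := by
  apply String.toList_inj.mp
  cases l with
  | nil => simp [pysem, PySem.Chars.join_singleton, PySem.Chars.join_nil]
  | cons y t =>
    simp only [pysem, String.toList_append]
    rw [List.map_cons, List.map_cons, PySem.Chars.join_cons_cons]
    simp

lemma pv_inter_eq_cons (c : Char) : ∀ (cs : List Char) (ss : List String),
    pvInter (c :: cs) ss = c.toString :: pvSC cs ss := by
  intro cs
  induction cs generalizing c with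
  | nil => intro ss; cases ss <;> rfl
  | cons c' cs ih =>
    intro ss
    cases ss with
    | nil => rfl
    | cons s ss => simp [pvInter, pvSC, ih c' ss]

lemma pv_fill_join : ∀ (cs : List Char) (ss : List String) (acc : String),
    pvFill acc cs ss = acc ++ PySem.Str.join "" (pvSC cs ss) := by
  intro cs
  induction cs with
  | nil => intro ss acc; simp [pvFill, pvSC, pv_join_nil]
  | cons c cs ih =>
    intro ss acc
    cases ss with
    | nil => simp [pvFill, pvSC, pv_join_nil]
    | cons s ss =>
      show pvFill (acc ++ s ++ c.toString) cs ss = acc ++ PySem.Str.join "" (s :: c.toString :: pvSC cs ss)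
      rw [ih, pv_join_cons, pv_join_cons]
      apply String.toList_inj.mp
      simp

lemma pv_prodRep_length (seps : List String) : ∀ (n : Nat) (t : List String),
    t ∈ pvProdRep seps n → t.length = n := by
  intro n
  induction n with
  | zero => intro t ht; simp [pvProdRep] at ht; simp [ht]
  | succ n ih =>
    intro t ht
    simp [pvProdRep] at ht
    obtain ⟨s, _, u, hu, rfl⟩ := ht
    simp [ih u hu]

lemma pv_prod_map (seps : List String) : ∀ (cs : List Char) (acc : String),
    (pvProdRep seps cs.length).map (fun t => pvFill acc cs t) = pvCanon seps acc cs := by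
  intro cs
  induction cs with
  | nil => intro acc; simp [pvProdRep, pvFill, pvCanon]
  | cons c cs ih =>
    intro acc
    simp only [List.length_cons, pvProdRep, pvCanon, List.map_flatMap, List.map_map]
    refine List.flatMap_congr (fun s _ => ?_)
    exact ih (acc ++ s ++ c.toString)

lemma pv_alt_foldl (seps : List String) : ∀ (cs : List Char) (inits : List String),
    cs.foldl
      (fun results ch => results.flatMap (fun r => seps.map (fun sep => r ++ sep ++ ch.toString)))
      inits
    = inits.flatMap (fun r => pvCanon seps r cs) := by
  intro cs
  induction cs with
  | nil => intro inits; simp [pvCanon]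
  | cons c cs ih =>
    intro inits
    rw [List.foldl_cons, ih]
    simp [pvCanon, List.flatMap_assoc, List.flatMap_map]

-- A's inner loop over range(len(word)), started at index j, appends exactly the
-- interleaving of the remaining characters with the remaining tuple entries.
lemma pv_loop_eq (w : String) (t : List String) (ht : t.length + 1 = w.toList.length) :
    ∀ (m j : Nat) (acc : List String), j + m = w.toList.length →
    (List.range' j m).foldl
      (fun (acc : List String) (i : Nat) =>
        let acc := acc ++ [((PySem.Str.pyGet? w (i : Int)).map Char.toString).getD ""]
        if i < w.toList.length - 1 then acc ++ [PySem.List.pyGetD t (i : Int) ""] else acc)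
      acc
    = acc ++ pvInter (w.toList.drop j) (t.drop j) := by
  intro m
  induction m with
  | zero =>
    intro j acc hj
    have h1 : w.toList.drop j = [] := List.drop_eq_nil_of_le (by omega)
    have h2 : t.drop j = [] := List.drop_eq_nil_of_le (by omega)
    simp [h1, h2, pvInter]
  | succ m ih =>
    intro j acc hj
    have hjlt : j < w.toList.length := by omega
    have hwdrop : w.toList.drop j = w.toList[j] :: w.toList.drop (j + 1) :=
      List.drop_eq_getElem_cons hjlt
    have hget : PySem.Str.pyGet? w (j : Int) = some (w.toList[j]) := by
      simp [pysem]
    rw [List.range'_succ, List.foldl_cons, ih (j + 1) _ (by omega)]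
    by_cases hcase : j < w.toList.length - 1
    · have hjt : j < t.length := by omega
      have hj1lt : j + 1 < w.toList.length := by omega
      have htdrop : t.drop j = t[j] :: t.drop (j + 1) := List.drop_eq_getElem_cons hjt
      have hwdrop1 : w.toList.drop (j + 1) = w.toList[j + 1] :: w.toList.drop (j + 2) :=
        List.drop_eq_getElem_cons hj1lt
      have hgetT : PySem.List.pyGetD t (j : Int) "" = t[j] := by
        rw [PySem.List.pyGetD_natCast]
        exact List.getD_eq_getElem t "" hjt
      simp only [hget, if_pos hcase, hgetT, hwdrop, hwdrop1, htdrop, pvInter]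
      simp
    · -- last index: j = length - 1, no separator appended, and the tuple is exhausted
      have htdrop : t.drop j = [] := List.drop_eq_nil_of_le (by omega)
      have hwdrop2 : w.toList.drop (j + 1) = [] := List.drop_eq_nil_of_le (by omega)
      simp only [hget, if_neg hcase, hwdrop, hwdrop2, htdrop, pvInter]
      simp

-- ===== VERDICT (by name: the statement is the Claim_ definition above) =====
theorem insert_separators_in_word_spec : Claim_equal_insert_separators_in_word := by
  intro word seps _ hpre
  unfold Spec_insert_separators_in_word
  have hne : word.toList ≠ [] := by
    intro h
    exact hpre (String.toList_inj.mp (by simp [h]))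
  obtain ⟨c, rest, hw⟩ : ∃ c rest, word.toList = c :: rest := by
    cases hlist : word.toList with
    | nil => exact absurd hlist hne
    | cons c rest => exact ⟨c, rest, rfl⟩
  have halt : insert_separators_in_word_alt word seps =
      List.foldl
        (fun results ch => results.flatMap (fun r => seps.map (fun sep => r ++ sep ++ ch.toString)))
        [c.toString] rest := by
    unfold insert_separators_in_word_alt
    rw [hw]
  by_cases h1 : word.toList.length = 1
  · -- length-1 word: A returns [word], B's fold over the empty tail returns [word[0]]
    have hrest : rest = [] := by
      rw [hw] at h1; simpa using h1
    have hcond : (PySem.Str.len word == 1) = true := by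
      simp [PySem.Str.len_eq, h1]
    rw [halt, hrest]
    simp only [List.foldl_nil]
    unfold insert_separators_in_word
    rw [if_pos hcond]
    have hwc : word = c.toString := by
      apply String.toList_inj.mp
      rw [hw, hrest]
      simp
    rw [hwc]
  · have hcond : ¬ ((PySem.Str.len word == 1) = true) := by
      simp [PySem.Str.len_eq]
      exact h1
    have hslots : word.toList.length - 1 = rest.length := by rw [hw]; simp
    have key : (pvProdRep seps (word.toList.length - 1)).map
        (fun t =>
          PySem.Str.join ""
            ((List.range word.toList.length).foldl
              (fun (acc : List String) (i : Nat) =>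
                let acc := acc ++ [((PySem.Str.pyGet? word (i : Int)).map Char.toString).getD ""]
                if i < word.toList.length - 1 then acc ++ [PySem.List.pyGetD t (i : Int) ""] else acc)
              ([] : List String)))
        = pvCanon seps c.toString rest := by
      have hmap : (pvProdRep seps (word.toList.length - 1)).map
          (fun t =>
            PySem.Str.join ""
              ((List.range word.toList.length).foldl
                (fun (acc : List String) (i : Nat) =>
                  let acc := acc ++ [((PySem.Str.pyGet? word (i : Int)).map Char.toString).getD ""]
                  if i < word.toList.length - 1 then acc ++ [PySem.List.pyGetD t (i : Int) ""] else acc)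
                ([] : List String)))
          = (pvProdRep seps (word.toList.length - 1)).map (fun t => pvFill c.toString rest t) := by
        refine List.map_congr_left (fun t htmem => ?_)
        have hlen : t.length = word.toList.length - 1 :=
          pv_prodRep_length seps _ t htmem
        have hn1 : word.toList.length ≠ 0 := by rw [hw]; simp
        rw [List.range_eq_range',
          pv_loop_eq word t (by omega) word.toList.length 0 [] (by omega)]
        simp only [List.nil_append, List.drop_zero, hw]
        rw [pv_inter_eq_cons, pv_join_cons, ← pv_fill_join]
      rw [hmap, hslots, pv_prod_map]
    rw [halt, pv_alt_foldl]
    unfold insert_separators_in_word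
    rw [if_neg hcond]
    exact key.trans (by simp)
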